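-- pv_equiv track=rewrite | github.com/tareqkayyali/tomo-app | ai-service/app/flow/patterns/study_scheduling_capsule.py | _match_subject
-- ===== SOURCE A (Python) =====
-- from typing import Optional
--
-- _SUBJECT_SYNONYMS: dict[str, list[str]] = {
--     "math": ["math", "maths", "mathematics", "algebra", "calculus", "geometry"],
--     "physics": ["physics", "phys"],
--     "english": ["english", "eng", "literature", "essay"],
--     "biology": ["biology", "bio"],
--     "chemistry": ["chemistry", "chem"],
--     "arabic": ["arabic", "arabi"],
--     "history": ["history", "hist"],
--     "geography": ["geography", "geo"],
--     "computer science": ["cs", "computer", "programming", "coding", "comp sci"],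
--     "economics": ["economics", "econ"],
--     "french": ["french"],
--     "spanish": ["spanish"],
--     "science": ["science"],
--     "islamic studies": ["islamic", "islam", "islamiat", "quran"],
-- }
--
-- def _match_subject(extracted: str, available: list[str]) -> Optional[str]:
--     """Match an extracted subject to the player's configured subjects."""
--     lowered = extracted.lower()
--     for subj in available:
--         if subj.lower() == lowered:
--             return subj
--         # Fuzzy: check if the extracted subject is a synonym for a configured subject
--         for canonical, synonyms in _SUBJECT_SYNONYMS.items():
--             if lowered in synonyms or canonical == lowered:
--                 if subj.lower() == canonical or subj.lower() in synonyms: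
--                     return subj
--     return extracted  # Keep the extracted subject even if not in player's list
-- ===== SOURCE B (Python) =====
-- _SUBJECT_SYNONYMS: dict[str, list[str]] = {
--     "math": ["math", "maths", "mathematics", "algebra", "calculus", "geometry"],
--     "physics": ["physics", "phys"],
--     "english": ["english", "eng", "literature", "essay"],
--     "biology": ["biology", "bio"],
--     "chemistry": ["chemistry", "chem"],
--     "arabic": ["arabic", "arabi"],
--     "history": ["history", "hist"],
--     "geography": ["geography", "geo"],
--     "computer science": ["cs", "computer", "programming", "coding", "comp sci"],
--     "economics": ["economics", "econ"],
--     "french": ["french"],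
--     "spanish": ["spanish"],
--     "science": ["science"],
--     "islamic studies": ["islamic", "islam", "islamiat", "quran"],
-- }
--
-- def _match_subject(extracted, available):
--     """Match an extracted subject to the player's configured subjects."""
--     lowered = extracted.lower()
--     # Build once: every name belonging to a synonym group that `lowered` hits.
--     candidates = set()
--     for canonical, synonyms in _SUBJECT_SYNONYMS.items():
--         if lowered == canonical or lowered in synonyms:
--             candidates.add(canonical)
--             candidates.update(synonyms)
--     for subj in available:
--         low = subj.lower()
--         if low == lowered or low in candidates:
--             return subj
--     return extracted
-- ===== Notes on version B (the rewrite author's own statement) =====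
-- stated objective: faster
-- what changed: B precomputes, before scanning available, the set of all names in synonym groups hit by the lowered extracted subject, replacing A's nested per-element rescan of the synonym dict with a single membership pass.
import Mathlib
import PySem

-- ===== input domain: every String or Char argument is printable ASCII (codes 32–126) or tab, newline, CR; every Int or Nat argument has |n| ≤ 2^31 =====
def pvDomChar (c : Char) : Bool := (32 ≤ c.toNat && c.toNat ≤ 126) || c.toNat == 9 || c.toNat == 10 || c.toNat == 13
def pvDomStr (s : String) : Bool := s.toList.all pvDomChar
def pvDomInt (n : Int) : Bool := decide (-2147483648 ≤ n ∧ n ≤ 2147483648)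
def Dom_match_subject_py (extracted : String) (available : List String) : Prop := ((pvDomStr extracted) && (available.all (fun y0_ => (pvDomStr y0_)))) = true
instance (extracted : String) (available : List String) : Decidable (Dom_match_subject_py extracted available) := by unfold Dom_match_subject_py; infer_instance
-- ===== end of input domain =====

-- B builds the matching synonym groups' name set once before scanning `available`,
-- replacing A's per-element nested dict scan (objective: alternative decomposition).


-- the module-level _SUBJECT_SYNONYMS dict (insertion order)
def subjectSynonyms : List (String × List String) :=
  [ ("math", ["math", "maths", "mathematics", "algebra", "calculus", "geometry"]),
    ("physics", ["physics", "phys"]),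
    ("english", ["english", "eng", "literature", "essay"]),
    ("biology", ["biology", "bio"]),
    ("chemistry", ["chemistry", "chem"]),
    ("arabic", ["arabic", "arabi"]),
    ("history", ["history", "hist"]),
    ("geography", ["geography", "geo"]),
    ("computer science", ["cs", "computer", "programming", "coding", "comp sci"]),
    ("economics", ["economics", "econ"]),
    ("french", ["french"]),
    ("spanish", ["spanish"]),
    ("science", ["science"]),
    ("islamic studies", ["islamic", "islam", "islamiat", "quran"]) ]

-- ===== PORT A =====
-- A's inner 'for canonical, synonyms in _SUBJECT_SYNONYMS.items()' loop for one subj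
def aGroupScan (lowered subjL : String) : List (String × List String) → Bool
  | [] => false
  | (canonical, synonyms) :: rest =>
    if synonyms.contains lowered || canonical == lowered then
      if subjL == canonical || synonyms.contains subjL then true
      else aGroupScan lowered subjL rest
    else aGroupScan lowered subjL rest

-- A's outer 'for subj in available' loop
def aLoop (extracted lowered : String) : List String → Option String
  | [] => some extracted
  | subj :: rest =>
    if PySem.Str.lower subj == lowered then some subj
    else if aGroupScan lowered (PySem.Str.lower subj) subjectSynonyms then some subj
    else aLoop extracted lowered rest

def match_subject_py (extracted : String) (available : List String) : Option String :=
  aLoop extracted (PySem.Str.lower extracted) available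

-- ===== PORT B =====
-- B's one-time candidate-set build over the synonym table
def bCands (lowered : String) : List (String × List String) → PySem.Set String → PySem.Set String
  | [], s => s
  | (canonical, synonyms) :: rest, s =>
    bCands lowered rest
      (if lowered == canonical || synonyms.contains lowered then
        PySem.Set.update (PySem.Set.add s canonical) synonyms
      else s)

-- B's single membership pass over available
def bLoop (extracted lowered : String) (cands : PySem.Set String) : List String → Option String
  | [] => some extracted
  | subj :: rest =>
    let low := PySem.Str.lower subj
    if low == lowered || PySem.Set.contains cands low then some subj
    else bLoop extracted lowered cands rest

def match_subject_py_alt (extracted : String) (available : List String) : Option String :=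
  let lowered := PySem.Str.lower extracted
  bLoop extracted lowered (bCands lowered subjectSynonyms PySem.Set.empty) available

-- ===== PRECONDITION & SPEC =====
def Spec_match_subject_py (extracted : String) (available : List String) (out : Option String) : Prop := out = match_subject_py_alt extracted available
instance (extracted : String) (available : List String) (out : Option String) : Decidable (Spec_match_subject_py extracted available out) := by unfold Spec_match_subject_py; infer_instance

-- ===== CLAIM (what is proved, stated in full; the proofs are below) =====
def Claim_equal_match_subject_py : Prop := ∀ (extracted : String) (available : List String), Dom_match_subject_py extracted available → Spec_match_subject_py extracted available (match_subject_py extracted available)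

-- ===== LEMMAS AND PROOFS =====

-- membership in B's candidate set, characterised over any table and accumulator
lemma mem_bCands (lowered x : String) (t : List (String × List String)) (s : PySem.Set String) :
    x ∈ bCands lowered t s ↔
      x ∈ s ∨ ∃ p ∈ t, (lowered = p.1 ∨ lowered ∈ p.2) ∧ (x = p.1 ∨ x ∈ p.2) := by
  induction t generalizing s with
  | nil => simp [bCands]
  | cons hd tl ih =>
    obtain ⟨c, syns⟩ := hd
    simp only [bCands, ih]
    by_cases h : lowered = c ∨ lowered ∈ syns
    · rw [if_pos (by simpa using h)]
      simp only [PySem.Set.mem_update, PySem.Set.mem_add, List.exists_mem_cons_iff]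
      constructor
      · rintro (((p | q) | r) | e)
        · exact Or.inl p
        · exact Or.inr (Or.inl ⟨h, Or.inl q⟩)
        · exact Or.inr (Or.inl ⟨h, Or.inr r⟩)
        · exact Or.inr (Or.inr e)
      · rintro (p | ⟨_, q | r⟩ | e)
        · exact Or.inl (Or.inl (Or.inl p))
        · exact Or.inl (Or.inl (Or.inr q))
        · exact Or.inl (Or.inr r)
        · exact Or.inr e
    · rw [if_neg (by simpa using h)]
      simp only [List.exists_mem_cons_iff]
      constructor
      · rintro (p | e)
        · exact Or.inl p
        · exact Or.inr (Or.inr e)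
      · rintro (p | ⟨hc, _⟩ | e)
        · exact Or.inl p
        · exact absurd hc h
        · exact Or.inr e

-- A's inner group scan, same characterisation
lemma aGroupScan_iff (lowered low : String) (t : List (String × List String)) :
    aGroupScan lowered low t = true ↔
      ∃ p ∈ t, (lowered = p.1 ∨ lowered ∈ p.2) ∧ (low = p.1 ∨ low ∈ p.2) := by
  induction t with
  | nil => simp [aGroupScan]
  | cons hd tl ih =>
    obtain ⟨c, syns⟩ := hd
    simp only [aGroupScan]
    by_cases h : lowered ∈ syns ∨ c = lowered
    · rw [if_pos (by simpa using h)]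
      by_cases h2 : low = c ∨ low ∈ syns
      · rw [if_pos (by simpa using h2)]
        simp only [List.exists_mem_cons_iff]
        constructor
        · intro _
          exact Or.inl ⟨by tauto, h2⟩
        · intro _
          trivial
      · rw [if_neg (by simpa using h2)]
        rw [ih]
        simp only [List.exists_mem_cons_iff]
        constructor
        · exact Or.inr
        · rintro (⟨_, hl⟩ | e)
          · exact absurd hl h2
          · exact e
    · rw [if_neg (by simpa using h)]
      rw [ih]
      simp only [List.exists_mem_cons_iff]
      constructor
      · exact Or.inr
      · rintro (⟨hc, _⟩ | e)
        · exact absurd (by tauto : lowered ∈ syns ∨ c = lowered) h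
        · exact e

-- the two per-element tests agree
lemma scan_eq_contains (lowered low : String) :
    aGroupScan lowered low subjectSynonyms =
      PySem.Set.contains (bCands lowered subjectSynonyms PySem.Set.empty) low := by
  rw [Bool.eq_iff_iff, aGroupScan_iff,
    PySem.Set.contains_iff, mem_bCands]
  simp [PySem.Set.empty]

-- the two traversals of available agree
lemma loop_eq (extracted lowered : String) (avail : List String) :
    aLoop extracted lowered avail =
      bLoop extracted lowered (bCands lowered subjectSynonyms PySem.Set.empty) avail := by
  induction avail with
  | nil => rfl
  | cons subj rest ih =>
    simp only [aLoop, bLoop, scan_eq_contains lowered (PySem.Str.lower subj)]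
    by_cases h1 : (PySem.Str.lower subj == lowered) = true
    · simp [h1]
    · simp only [Bool.not_eq_true] at h1
      simp only [h1, Bool.false_or, Bool.false_eq_true, if_false]
      split_ifs with h2
      · rfl
      · exact ih

-- ===== VERDICT (by name: the statement is the Claim_ definition above) =====
theorem match_subject_py_spec : Claim_equal_match_subject_py := by
  intro extracted available _
  unfold Spec_match_subject_py match_subject_py match_subject_py_alt
  exact loop_eq extracted (PySem.Str.lower extracted) available
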